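-- pv_equiv track=rewrite | github.com/soyiu100/uw_grade_distrib | courses/local_course_oper.py | yearsub
-- ===== SOURCE A (Python) =====
-- def yearsub(year1, year2):
--     month1 = year1 % 10
--     month2 = year2 % 10
--     test = month1 - month2
--     i = 0
--     while test <= 0:
--         test += 4
--         i += 1
--     return (int(year1 / 10) - int(year2 / 10) - i) * 4 + test
-- ===== SOURCE B (Python) =====
-- def yearsub(year1, year2):
--     # closed form: the loop counter cancels, leaving (q1 - q2)*4 + (m1 - m2)
--     return (int(year1 / 10) - int(year2 / 10)) * 4 + (year1 % 10 - year2 % 10)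
-- ===== Notes on version B (the rewrite author's own statement) =====
-- stated objective: simpler
-- what changed: Replaced the while-loop that shuffles the month difference by +4 steps (whose counter cancels out of the final expression) with a single closed-form arithmetic expression, keeping int(.../10) truncation and % 10 exactly.
import Mathlib
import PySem

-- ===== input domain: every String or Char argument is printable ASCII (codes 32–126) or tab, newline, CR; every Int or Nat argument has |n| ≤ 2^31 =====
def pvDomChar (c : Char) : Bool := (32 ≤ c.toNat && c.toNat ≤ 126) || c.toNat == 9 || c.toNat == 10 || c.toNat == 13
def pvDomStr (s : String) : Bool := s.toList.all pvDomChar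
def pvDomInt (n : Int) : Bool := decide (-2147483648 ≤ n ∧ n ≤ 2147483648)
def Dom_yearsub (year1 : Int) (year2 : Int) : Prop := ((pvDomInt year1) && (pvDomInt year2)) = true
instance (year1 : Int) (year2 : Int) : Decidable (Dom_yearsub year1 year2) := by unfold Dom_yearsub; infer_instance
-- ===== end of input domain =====

-- B replaces A's +4 while-loop by the closed-form expression it computes (the loop counter cancels); objective: simpler.

-- ===== PORT A =====
-- the 'while test <= 0: test += 4; i += 1' loop, returning the final (test, i)
def yearsubLoop (test : Int) (i : Int) : Int × Int :=
  if test ≤ 0 then yearsubLoop (test + 4) (i + 1) else (test, i)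
termination_by (1 - test).toNat
decreasing_by omega

-- int(year/10) truncates toward zero = Int.tdiv; exact for |year| ≤ 2^31 (float division is exact enough there)
def yearsub (year1 : Int) (year2 : Int) : Int :=
  let month1 := PySem.Int.mod year1 10
  let month2 := PySem.Int.mod year2 10
  let p := yearsubLoop (month1 - month2) 0
  (year1.tdiv 10 - year2.tdiv 10 - p.2) * 4 + p.1

-- ===== PORT B =====
def yearsub_alt (year1 : Int) (year2 : Int) : Int :=
  (year1.tdiv 10 - year2.tdiv 10) * 4 + (PySem.Int.mod year1 10 - PySem.Int.mod year2 10)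

-- ===== PRECONDITION & SPEC =====
def Spec_yearsub (year1 : Int) (year2 : Int) (out : Int) : Prop := out = yearsub_alt year1 year2
instance (year1 : Int) (year2 : Int) (out : Int) : Decidable (Spec_yearsub year1 year2 out) := by unfold Spec_yearsub; infer_instance

-- ===== CLAIM (what is proved, stated in full; the proofs are below) =====
def Claim_equal_yearsub : Prop := ∀ (year1 : Int) (year2 : Int), Dom_yearsub year1 year2 → Spec_yearsub year1 year2 (yearsub year1 year2)

-- ===== LEMMAS AND PROOFS =====

-- loop invariant: test - 4*i is preserved, so the final pair satisfies the same relation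
theorem yearsubLoop_inv (test i : Int) :
    (yearsubLoop test i).1 - 4 * (yearsubLoop test i).2 = test - 4 * i := by
  fun_induction yearsubLoop test i with
  | case1 test i h ih => omega
  | case2 test i h => simp

-- ===== VERDICT (by name: the statement is the Claim_ definition above) =====
theorem yearsub_spec : Claim_equal_yearsub := by
  intro year1 year2 _
  unfold Spec_yearsub yearsub yearsub_alt
  dsimp only
  have h := yearsubLoop_inv (PySem.Int.mod year1 10 - PySem.Int.mod year2 10) 0
  omega
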